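-- pv_equiv track=rewrite | github.com/Tadej0/Seminarska | knjiznica.py | najdiLokacijoMape
-- ===== SOURCE A (Python) =====
-- def najdiLokacijoMape(naslov):
--     i = len(naslov) - 1
--     while (i>=0):
--         if(naslov[i] == "/"):
--             break
--         else:
--             i = i-1
--     naslov = naslov[0:(i+1)]
--     return (naslov)
-- ===== SOURCE B (Python) =====
-- def najdiLokacijoMape(naslov):
--     parts = naslov.split('/')
--     return '/'.join(parts[:-1]) + ('/' if len(parts) > 1 else '')
-- ===== Notes on version B (the rewrite author's own statement) =====
-- stated objective: faster
-- what changed: Instead of scanning backward character by character for the last separator, B splits the string into separator-delimited components and reassembles all but the last, appending one separator when any separator existed.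
import Mathlib
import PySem

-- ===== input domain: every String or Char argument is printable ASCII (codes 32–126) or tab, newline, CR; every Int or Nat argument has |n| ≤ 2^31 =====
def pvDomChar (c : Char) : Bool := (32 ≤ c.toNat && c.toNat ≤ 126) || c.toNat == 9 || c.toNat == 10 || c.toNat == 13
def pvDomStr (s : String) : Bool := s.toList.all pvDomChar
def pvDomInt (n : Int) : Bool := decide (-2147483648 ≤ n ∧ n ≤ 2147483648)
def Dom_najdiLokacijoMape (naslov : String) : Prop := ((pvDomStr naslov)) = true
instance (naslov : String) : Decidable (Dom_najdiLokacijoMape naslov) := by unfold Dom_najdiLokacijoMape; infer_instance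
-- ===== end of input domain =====

-- B re-implements the "directory part up to the last '/'" by split/rejoin of path components
-- instead of A's backward character scan; equivalence of the RETURN value is proved (A mutates
-- only its local variable, nothing caller-visible).

-- ===== PORT A =====
-- the while loop: i walks down from len-1 until naslov[i] == '/' or i < 0
def najdiLokacijoMapeLoop (cs : List Char) (i : Int) : Int :=
  if _h : 0 ≤ i then
    match PySem.List.pyGet? cs i with
    | some c => if c == '/' then i else najdiLokacijoMapeLoop cs (i - 1)
    | none => i          -- unreachable: the loop is entered with i < len(naslov)
  else i
termination_by (i + 1).toNat
decreasing_by omega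

def najdiLokacijoMape (naslov : String) : String :=
  String.ofList (PySem.Chars.slice naslov.toList (some 0)
    (some (najdiLokacijoMapeLoop naslov.toList ((naslov.toList.length : Int) - 1) + 1)))

-- ===== PORT B =====
def najdiLokacijoMape_alt (naslov : String) : String :=
  String.ofList (PySem.Chars.join ['/'] (PySem.Chars.splitOn naslov.toList ['/']).dropLast ++
    (if 1 < (PySem.Chars.splitOn naslov.toList ['/']).length then ['/'] else []))

-- ===== PRECONDITION & SPEC =====
def Spec_najdiLokacijoMape (naslov : String) (out : String) : Prop := out = najdiLokacijoMape_alt naslov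
instance (naslov : String) (out : String) : Decidable (Spec_najdiLokacijoMape naslov out) := by unfold Spec_najdiLokacijoMape; infer_instance

-- ===== CLAIM (what is proved, stated in full; the proofs are below) =====
def Claim_equal_najdiLokacijoMape : Prop := ∀ (naslov : String), Dom_najdiLokacijoMape naslov → Spec_najdiLokacijoMape naslov (najdiLokacijoMape naslov)

-- ===== LEMMAS AND PROOFS =====

-- common target: the prefix of cs up to and including the last '/', [] if there is none
def dirChars : List Char → List Char
  | [] => []
  | c :: rest =>
    let d := dirChars rest
    if d.isEmpty then (if c = '/' then [c] else []) else c :: d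

-- reference split on '/' by simple left recursion (proof-side model of splitOn)
def mySplit (pre : List Char) : List Char → List (List Char)
  | [] => [pre]
  | c :: rest => if c = '/' then pre :: mySplit [] rest else mySplit (pre ++ [c]) rest

theorem mySplit_ne_nil (pre : List Char) (cs : List Char) : mySplit pre cs ≠ [] := by
  induction cs generalizing pre with
  | nil => simp [mySplit]
  | cons c rest ih =>
    simp only [mySplit]
    split
    · simp
    · exact ih _

theorem dirChars_nil_iff (cs : List Char) : dirChars cs = [] ↔ '/' ∉ cs := by
  induction cs with
  | nil => simp [dirChars]
  | cons c rest ih =>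
    simp only [dirChars, List.mem_cons]
    by_cases hd : dirChars rest = []
    · have hr : '/' ∉ rest := ih.mp hd
      by_cases hc : c = '/' <;> simp [hd, hc, hr] <;> try tauto
    · simp [List.isEmpty_iff, hd]
      tauto

theorem goLemma (l : List Char) : ∀ (fuel : Nat) (acc : List (List Char)) (cur : List Char),
    l.length ≤ fuel →
    PySem.Chars.splitOn.go ['/'] fuel l cur acc = acc.reverse ++ mySplit cur.reverse l := by
  induction l with
  | nil =>
    intro fuel acc cur _
    cases fuel <;> simp [PySem.Chars.splitOn.go, mySplit]
  | cons c rest ih =>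
    intro fuel acc cur hlen
    cases fuel with
    | zero => simp at hlen
    | succ f =>
      simp only [PySem.Chars.splitOn.go]
      by_cases hc : c = '/'
      · subst hc
        simp only [List.isPrefixOf, BEq.rfl, Bool.true_and, if_true,
          List.length_singleton, List.drop_one, List.tail_cons]
        rw [ih f (cur.reverse :: acc) [] (by simpa using hlen)]
        simp [mySplit]
      · have hpre : ['/'].isPrefixOf (c :: rest) = false := by
          simp [List.isPrefixOf]; intro h; exact hc h.symm
        rw [if_neg (by simp [hpre])]
        rw [ih f acc (c :: cur) (by simpa using hlen)]
        simp [mySplit, hc]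

theorem splitOn_eq_mySplit (cs : List Char) :
    PySem.Chars.splitOn cs ['/'] = mySplit [] cs := by
  rw [PySem.Chars.splitOn, goLemma cs (cs.length + 1) [] [] (by omega)]
  rfl

theorem mySplit_length_iff (cs : List Char) : ∀ pre,
    (1 < (mySplit pre cs).length ↔ '/' ∈ cs) := by
  induction cs with
  | nil => intro pre; simp [mySplit]
  | cons c rest ih =>
    intro pre
    simp only [mySplit, List.mem_cons]
    by_cases hc : c = '/'
    · subst hc
      have := mySplit_ne_nil [] rest
      have : 0 < (mySplit [] rest).length := List.length_pos_iff.mpr this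
      simp; omega
    · rw [if_neg hc, ih]
      tauto

theorem join_cons_ne_nil (sep a : List Char) (l : List (List Char)) (h : l ≠ []) :
    PySem.Chars.join sep (a :: l) = a ++ sep ++ PySem.Chars.join sep l := by
  cases l with
  | nil => exact absurd rfl h
  | cons b t => exact PySem.Chars.join_cons_cons sep a b t

theorem key_B (cs : List Char) : ∀ pre,
    PySem.Chars.join ['/'] ((mySplit pre cs).dropLast) ++
      (if 1 < (mySplit pre cs).length then ['/'] else []) =
    if '/' ∈ cs then pre ++ dirChars cs else [] := by
  induction cs with
  | nil => intro pre; simp [mySplit, PySem.Chars.join, List.intercalate]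
  | cons c rest ih =>
    intro pre
    by_cases hc : c = '/'
    · subst hc
      simp only [mySplit, List.mem_cons, true_or, if_true]
      have hne := mySplit_ne_nil [] rest
      have hlen : 0 < (mySplit [] rest).length := List.length_pos_iff.mpr hne
      rw [List.dropLast_cons_of_ne_nil hne]
      by_cases hr : '/' ∈ rest
      · have h2 : 1 < (mySplit [] rest).length := (mySplit_length_iff rest []).mpr hr
        have hdne : (mySplit [] rest).dropLast ≠ [] := by
          intro h
          have hld := List.length_dropLast (xs := mySplit [] rest)
          rw [h] at hld; simp at hld; omega
        rw [join_cons_ne_nil _ _ _ hdne]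
        have hIH := ih []
        rw [if_pos h2, if_pos hr] at hIH
        simp only [List.nil_append] at hIH
        rw [if_pos (show 1 < (pre :: mySplit [] rest).length by simp; omega)]
        have hdir : dirChars ('/' :: rest) = '/' :: dirChars rest := by
          have : dirChars rest ≠ [] := fun h => ((dirChars_nil_iff rest).mp h) hr
          simp [dirChars, List.isEmpty_iff, this]
        rw [hdir]
        rw [List.append_assoc, List.append_assoc, hIH]
        simp
      · have h1 : ¬ 1 < (mySplit [] rest).length := fun h => hr ((mySplit_length_iff rest []).mp h)
        have hlen1 : (mySplit [] rest).length = 1 := by omega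
        obtain ⟨x, hx⟩ : ∃ x, mySplit [] rest = [x] := List.length_eq_one_iff.mp hlen1
        rw [hx]
        have hdir : dirChars ('/' :: rest) = ['/'] := by
          have : dirChars rest = [] := (dirChars_nil_iff rest).mpr hr
          simp [dirChars, this]
        rw [hdir]
        simp [PySem.Chars.join, List.intercalate]
    · simp only [mySplit, if_neg hc, List.mem_cons]
      rw [ih (pre ++ [c])]
      have hcc : ¬ '/' = c := fun h => hc h.symm
      by_cases hr : '/' ∈ rest
      · have hdne : dirChars rest ≠ [] := fun h => ((dirChars_nil_iff rest).mp h) hr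
        have hdir : dirChars (c :: rest) = c :: dirChars rest := by
          simp [dirChars, List.isEmpty_iff, hdne]
        simp [hr, hcc, hdir]
      · simp [hr, hcc]

-- ----- A side -----

theorem loopA_le (cs : List Char) (i : Int) : najdiLokacijoMapeLoop cs i ≤ i := by
  have H : ∀ n : Nat, ∀ i : Int, (i + 1).toNat = n → najdiLokacijoMapeLoop cs i ≤ i := by
    intro n
    induction n using Nat.strong_induction_on with
    | _ n ihn =>
      intro i hn
      rw [najdiLokacijoMapeLoop]
      split
      · split
        · split
          · exact le_refl i
          · have := ihn i.toNat (by omega) (i - 1) (by omega)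
            omega
        · exact le_refl i
      · exact le_refl i
  exact H _ i rfl

theorem loopA_ge (cs : List Char) (i : Int) (h : -1 ≤ i) : -1 ≤ najdiLokacijoMapeLoop cs i := by
  have H : ∀ n : Nat, ∀ i : Int, (i + 1).toNat = n → -1 ≤ i → -1 ≤ najdiLokacijoMapeLoop cs i := by
    intro n
    induction n using Nat.strong_induction_on with
    | _ n ihn =>
      intro i hn hi
      rw [najdiLokacijoMapeLoop]
      split
      · split
        · split
          · omega
          · exact ihn i.toNat (by omega) (i - 1) (by omega) (by omega)
        · omega
      · omega
  exact H _ i rfl h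

theorem loopA_append (cs : List Char) (c : Char) (i : Int) (hlt : i < (cs.length : Int)) :
    najdiLokacijoMapeLoop (cs ++ [c]) i = najdiLokacijoMapeLoop cs i := by
  have H : ∀ n : Nat, ∀ i : Int, (i + 1).toNat = n → i < (cs.length : Int) →
      najdiLokacijoMapeLoop (cs ++ [c]) i = najdiLokacijoMapeLoop cs i := by
    intro n
    induction n using Nat.strong_induction_on with
    | _ n ihn =>
      intro i hn hi
      conv_lhs => rw [najdiLokacijoMapeLoop.eq_def]
      conv_rhs => rw [najdiLokacijoMapeLoop.eq_def]
      by_cases h0 : 0 ≤ i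
      · rw [dif_pos h0, dif_pos h0]
        have hg : PySem.List.pyGet? (cs ++ [c]) i = PySem.List.pyGet? cs i := by
          rw [PySem.List.pyGet?_of_nonneg _ h0, PySem.List.pyGet?_of_nonneg _ h0]
          rw [List.getElem?_append_left (by omega)]
        rw [hg]
        cases hv : PySem.List.pyGet? cs i with
        | none => rfl
        | some ch =>
          simp only []
          split
          · rfl
          · exact ihn i.toNat (by omega) (i - 1) (by omega) (by omega)
      · rw [dif_neg h0, dif_neg h0]
  exact H _ i rfl hlt

theorem dirChars_snoc_slash (ds : List Char) : dirChars (ds ++ ['/']) = ds ++ ['/'] := by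
  induction ds with
  | nil => simp [dirChars]
  | cons d t ih => simp [dirChars, ih, List.isEmpty_iff]

theorem dirChars_snoc_ne (ds : List Char) (c : Char) (hc : ¬ c = '/') :
    dirChars (ds ++ [c]) = dirChars ds := by
  induction ds with
  | nil => simp [dirChars, hc]
  | cons d t ih =>
    by_cases h : dirChars t = []
    · simp [dirChars, ih, h]
    · simp [dirChars, ih, h]

theorem key_A (cs : List Char) :
    PySem.Chars.slice cs (some 0) (some (najdiLokacijoMapeLoop cs ((cs.length : Int) - 1) + 1)) =
      dirChars cs := by
  induction cs using List.reverseRecOn with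
  | nil =>
    rw [show ((([] : List Char).length : Int) - 1) = -1 by simp]
    rw [najdiLokacijoMapeLoop.eq_def]
    norm_num
    rfl
  | append_singleton ds c ih =>
    have hlen : ((ds ++ [c]).length : Int) - 1 = (ds.length : Int) := by simp
    rw [hlen, najdiLokacijoMapeLoop]
    rw [dif_pos (by omega)]
    have hg : PySem.List.pyGet? (ds ++ [c]) (ds.length : Int) = some c :=
      PySem.List.pyGet?_append_length (pre := ds) (y := c) (ys := [])
    rw [hg]
    simp only []
    by_cases hc : c = '/'
    · subst hc
      rw [if_pos (show (('/' == '/') = true) by decide)]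
      rw [dirChars_snoc_slash]
      simp [PySem.Chars.slice_eq_listSlice]
      rw [show ((ds.length : Int) + 1) = (((ds.length + 1 : Nat)) : Int) by push_cast; ring]
      rw [PySem.List.slice_to_natCast]
      simp
    · rw [if_neg (by simp [hc])]
      rw [loopA_append ds c _ (by omega)]
      rw [dirChars_snoc_ne ds c hc, ← ih]
      have hub : najdiLokacijoMapeLoop ds ((ds.length : Int) - 1) ≤ (ds.length : Int) - 1 :=
        loopA_le ds _
      have hlb : -1 ≤ najdiLokacijoMapeLoop ds ((ds.length : Int) - 1) :=
        loopA_ge ds _ (by omega)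
      set j := najdiLokacijoMapeLoop ds ((ds.length : Int) - 1) with hj
      simp only [PySem.Chars.slice_eq_listSlice, PySem.List.slice_zero_start]
      rw [PySem.List.slice_to _ (by omega), PySem.List.slice_to _ (by omega)]
      rw [List.take_append_of_le_length (by omega)]

-- ===== VERDICT (by name: the statement is the Claim_ definition above) =====
theorem najdiLokacijoMape_spec : Claim_equal_najdiLokacijoMape := by
  intro naslov _
  unfold Spec_najdiLokacijoMape najdiLokacijoMape najdiLokacijoMape_alt
  rw [key_A naslov.toList, splitOn_eq_mySplit]
  rw [key_B naslov.toList []]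
  by_cases hr : '/' ∈ naslov.toList
  · simp [hr]
  · rw [if_neg hr, (dirChars_nil_iff naslov.toList).mpr hr]
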